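-- pv_equiv track=rewrite | github.com/AbdullahMuchsin/python-latihanku | Latihan/Cek Kata Sandi v1.0/Main.py | operasi
-- ===== SOURCE A (Python) =====
-- def operasi(sandi):
--         hasil = 0
--         for i in range(len(sandi)):
--             if sandi[i].islower():
--                 hasil += 1
--                 break
--         for i in range(len(sandi)):
--             if sandi[i].isupper():
--                 hasil += 1
--                 break
--         for i in range(len(sandi)):
--             if sandi[i].isnumeric():
--                 hasil += 1
--                 break
--         for i in range(len(sandi)):
--             if sandi[i].isalnum() != True:
--                 hasil += 1
--                 break
--         return hasil
-- ===== SOURCE B (Python) =====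
-- def operasi(sandi):
--     has_lower = has_upper = has_digit = has_special = False
--     for c in sandi:
--         if c.islower():
--             has_lower = True
--         elif c.isupper():
--             has_upper = True
--         elif c.isnumeric():
--             has_digit = True
--         if not c.isalnum():
--             has_special = True
--         if has_lower and has_upper and has_digit and has_special:
--             break
--     return int(has_lower) + int(has_upper) + int(has_digit) + int(has_special)
-- ===== Notes on version B (the rewrite author's own statement) =====
-- stated objective: faster
-- what changed: Replaces A's four separate scans over the string (one per character class, each breaking at its first hit) by a single pass maintaining four boolean flags with an early exit once all four classes were seen, returning the sum of the flags.
import Mathlib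
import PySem

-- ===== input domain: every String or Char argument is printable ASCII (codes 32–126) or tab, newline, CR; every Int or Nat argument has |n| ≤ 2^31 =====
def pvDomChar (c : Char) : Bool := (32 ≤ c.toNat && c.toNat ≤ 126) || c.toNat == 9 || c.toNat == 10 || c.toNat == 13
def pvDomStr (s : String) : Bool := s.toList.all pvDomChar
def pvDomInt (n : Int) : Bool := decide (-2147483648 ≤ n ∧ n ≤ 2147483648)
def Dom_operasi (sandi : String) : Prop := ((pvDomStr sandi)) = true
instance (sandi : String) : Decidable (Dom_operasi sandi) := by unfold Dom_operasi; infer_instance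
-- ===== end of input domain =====

-- B replaces A's four separate first-hit scans by one pass with four boolean flags (early exit when all are set); objective: simpler.
-- Dom restricts to ASCII, where Python's c.isnumeric() coincides with PySem.Chars.isdigit (exact on ASCII).


-- ===== PORT A =====
-- one 'for i in range(len(sandi)): if pred: hasil += 1; break' loop: returns the increment (1 at the first match, else 0)
def pvScanA (p : Char → Bool) : List Char → Int
  | [] => 0
  | c :: cs => if p c then 1 else pvScanA p cs

def operasi (sandi : String) : Int :=
  let cs := sandi.toList
  let hasil : Int := 0
  let hasil := hasil + pvScanA PySem.Chars.islower cs
  let hasil := hasil + pvScanA PySem.Chars.isupper cs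
  let hasil := hasil + pvScanA PySem.Chars.isdigit cs   -- isnumeric = isdigit on the ASCII domain
  let hasil := hasil + pvScanA (fun c => !PySem.Chars.isalnum c) cs
  hasil

-- ===== PORT B =====
-- single loop carrying the four flags, with the early 'break' when all four are set
def pvLoopB : List Char → Bool → Bool → Bool → Bool → Bool × Bool × Bool × Bool
  | [], l, u, n, s => (l, u, n, s)
  | c :: cs, l, u, n, s =>
    let l := if PySem.Chars.islower c then true else l
    let u := if !PySem.Chars.islower c && PySem.Chars.isupper c then true else u
    let n := if !PySem.Chars.islower c && !PySem.Chars.isupper c && PySem.Chars.isdigit c then true else n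
    let s := if !PySem.Chars.isalnum c then true else s
    if l && u && n && s then (l, u, n, s) else pvLoopB cs l u n s

def operasi_alt (sandi : String) : Int :=
  let r := pvLoopB sandi.toList false false false false
  (if r.1 then (1:Int) else 0) + (if r.2.1 then 1 else 0) + (if r.2.2.1 then 1 else 0) + (if r.2.2.2 then 1 else 0)

-- ===== PRECONDITION & SPEC =====
def Spec_operasi (sandi : String) (out : Int) : Prop := out = operasi_alt sandi
instance (sandi : String) (out : Int) : Decidable (Spec_operasi sandi out) := by unfold Spec_operasi; infer_instance

-- ===== CLAIM (what is proved, stated in full; the proofs are below) =====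
def Claim_equal_operasi : Prop := ∀ (sandi : String), Dom_operasi sandi → Spec_operasi sandi (operasi sandi)

-- ===== LEMMAS AND PROOFS =====
theorem pvIfOr (p l : Bool) : (if p then true else l) = (l || p) := by
  cases p <;> cases l <;> rfl

theorem pvScanA_any (p : Char → Bool) (cs : List Char) :
    pvScanA p cs = if cs.any p then 1 else 0 := by
  induction cs with
  | nil => simp [pvScanA]
  | cons c cs ih =>
    by_cases h : p c <;> simp [pvScanA, h, ih]

theorem pvLoopB_flags (cs : List Char) (l u n s : Bool) :
    pvLoopB cs l u n s =
      (l || cs.any PySem.Chars.islower,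
       u || cs.any (fun c => !PySem.Chars.islower c && PySem.Chars.isupper c),
       n || cs.any (fun c => !PySem.Chars.islower c && !PySem.Chars.isupper c && PySem.Chars.isdigit c),
       s || cs.any (fun c => !PySem.Chars.isalnum c)) := by
  induction cs generalizing l u n s with
  | nil => simp [pvLoopB]
  | cons c cs ih =>
    simp only [pvLoopB, pvIfOr, List.any_cons]
    split_ifs with h
    · simp only [Bool.and_eq_true] at h
      obtain ⟨⟨⟨hl, hu⟩, hn⟩, hs⟩ := h
      simp [← Bool.or_assoc, hl, hu, hn, hs]
    · rw [ih]
      simp [Bool.or_assoc, Bool.or_comm, Bool.or_left_comm]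

-- the three alphanumeric classes are pairwise disjoint on Char
theorem pvCharClass (c : Char) :
    (PySem.Chars.isupper c = true → PySem.Chars.islower c = false) ∧
    (PySem.Chars.isdigit c = true → PySem.Chars.islower c = false ∧ PySem.Chars.isupper c = false) := by
  simp only [PySem.Chars.isupper, PySem.Chars.islower, PySem.Chars.isdigit, Bool.and_eq_true,
    decide_eq_true_eq, Bool.and_eq_false_iff, decide_eq_false_iff_not, Char.le_def,
    UInt32.le_iff_toNat_le, show 'A'.val.toNat = 65 from rfl, show 'Z'.val.toNat = 90 from rfl,
    show 'a'.val.toNat = 97 from rfl, show 'z'.val.toNat = 122 from rfl,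
    show '0'.val.toNat = 48 from rfl, show '9'.val.toNat = 57 from rfl]
  omega

-- a char matched by isupper is never islower (etc.): relate the disjoint-class anys to the plain ones
theorem any_upper_eq (cs : List Char) :
    cs.any (fun c => !PySem.Chars.islower c && PySem.Chars.isupper c) = cs.any PySem.Chars.isupper := by
  induction cs with
  | nil => rfl
  | cons c cs ih =>
    simp only [List.any_cons, ih]
    cases hc : PySem.Chars.isupper c
    · simp [hc]
    · simp [hc, (pvCharClass c).1 hc]

theorem any_digit_eq (cs : List Char) :
    cs.any (fun c => !PySem.Chars.islower c && !PySem.Chars.isupper c && PySem.Chars.isdigit c) =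
      cs.any PySem.Chars.isdigit := by
  induction cs with
  | nil => rfl
  | cons c cs ih =>
    simp only [List.any_cons, ih]
    cases hc : PySem.Chars.isdigit c
    · simp [hc]
    · simp [hc, ((pvCharClass c).2 hc).1, ((pvCharClass c).2 hc).2]

-- ===== VERDICT (by name: the statement is the Claim_ definition above) =====
theorem operasi_spec : Claim_equal_operasi := by
  intro sandi _
  unfold Spec_operasi operasi operasi_alt
  rw [pvLoopB_flags, any_upper_eq, any_digit_eq]
  simp only [pvScanA_any, Bool.false_or]
  ring
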